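-- pv_equiv track=rewrite | github.com/chyumin/Comp_Eng_Projects | Artificial Intelligence/Genetic Algorithms/Card Pile Problem/CP.py | cruzamento
-- ===== SOURCE A (Python) =====
-- def cruzamento(p1, p2):
--    iIni = 1
--    iFim = 4
--
--    f = [None]*10
--
--    for i in range (iIni, iFim):
--       f[i]=p1[i];
--
--    for i in range(len(f)):
--       if not(p2[i] in f):
--          for j in range(len(f)):
--             if f[j]==None:
--                f[j]=p2[i]
--                break
--    return f
-- ===== SOURCE B (Python) =====
-- def cruzamento(p1, p2):
--     seg = [p1[i] for i in range(1, 4)]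
--     vals = [p2[i] for i in range(10)]
--     rest = list(dict.fromkeys(v for v in vals if v not in seg))
--     return rest[:1] + seg + rest[1:7]
-- ===== Notes on version B (the rewrite author's own statement) =====
-- stated objective: simpler
-- what changed: B builds the child directly as a concatenation rest[:1] + p1[1:4] + rest[1:7], where rest is the ordered dedup of the p2 values outside the copied segment, instead of A's mutable None-array with a membership test over the evolving child and an inner first-None scan per inserted value.
import Mathlib
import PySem

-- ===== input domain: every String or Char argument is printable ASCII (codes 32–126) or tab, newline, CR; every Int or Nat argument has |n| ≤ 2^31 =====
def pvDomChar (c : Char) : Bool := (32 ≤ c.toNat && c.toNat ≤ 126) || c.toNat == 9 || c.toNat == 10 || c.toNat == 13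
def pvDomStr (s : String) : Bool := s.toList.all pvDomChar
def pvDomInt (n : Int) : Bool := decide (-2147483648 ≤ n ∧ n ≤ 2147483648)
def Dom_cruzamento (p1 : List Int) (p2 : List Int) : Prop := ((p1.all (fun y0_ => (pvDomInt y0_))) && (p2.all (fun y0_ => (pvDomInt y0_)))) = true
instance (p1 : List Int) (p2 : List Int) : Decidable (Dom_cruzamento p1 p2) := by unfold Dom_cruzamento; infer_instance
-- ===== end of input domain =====

-- B builds the child directly as the concatenation rest[:1] ++ p1[1:4] ++ rest[1:7]
-- (rest = ordered dedup of the p2 values outside the copied segment) instead of A's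
-- mutable None-array with nested rescans (simpler decomposition, same result).

-- ===== PORT A =====
-- inner loop 'for j in range(len(f)): if f[j]==None: f[j]=p2[i]; break' — set the first None slot, if any
def cruzSetFirstNone : List (Option Int) → Int → List (Option Int)
  | [], _ => []
  | none :: r, x => some x :: r
  | some a :: r, x => some a :: cruzSetFirstNone r x


def cruzamento (p1 : List Int) (p2 : List Int) : List Int :=
  let f0 : List (Option Int) := List.replicate 10 none
  let f1 := (PySem.List.pyRange 1 4 1).foldl (fun f i =>
      match PySem.List.pyGet? p1 i with
      | some v => PySem.List.pySetD f i (some v)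
      | none => f) f0
  let f2 := (PySem.List.pyRange 0 10 1).foldl (fun f i =>
      match PySem.List.pyGet? p2 i with
      | some x => if some x ∈ f then f else cruzSetFirstNone f x
      | none => f) f1
  f2.map (fun o => o.getD 0)


-- ===== PORT B =====
-- the comprehensions '[p1[i] for i in range(1,4)]' / '[p2[i] for i in range(10)]' as maps;
-- pyGet? is some on every index the comprehension reaches inside Pre_ (getD 0 is never taken there)
def cruzamento_alt (p1 : List Int) (p2 : List Int) : List Int :=
  let seg := (PySem.List.pyRange 1 4 1).map (fun i => (PySem.List.pyGet? p1 i).getD 0)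
  let vals := (PySem.List.pyRange 0 10 1).map (fun i => (PySem.List.pyGet? p2 i).getD 0)
  let rest := PySem.List.dedup (vals.filter (fun v => v ∉ seg))
  PySem.List.slice rest none (some 1) ++ seg ++ PySem.List.slice rest (some 1) (some 7)


-- ===== PRECONDITION & SPEC =====
-- Pre_ excludes inputs where A raises IndexError (len(p1) < 4 or len(p2) < 10) and inputs
-- where p2[:10] holds fewer than 7 distinct values outside the copied segment p1[1:4], on
-- which A returns a list still containing None — not a list of ints.
def Pre_cruzamento (p1 : List Int) (p2 : List Int) : Prop :=
  4 ≤ p1.length ∧ 10 ≤ p2.length ∧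
  7 ≤ (PySem.List.dedup ((p2.take 10).filter (fun x => x ∉ (p1.drop 1).take 3))).length
instance (p1 : List Int) (p2 : List Int) : Decidable (Pre_cruzamento p1 p2) := by
  unfold Pre_cruzamento; infer_instance

def pvWitness_cruzamento : List Int × List Int :=
  ([0, 1, 2, 3], [0, 1, 2, 3, 4, 5, 6, 7, 8, 9])

def Spec_cruzamento (p1 : List Int) (p2 : List Int) (out : List Int) : Prop := out = cruzamento_alt p1 p2
instance (p1 : List Int) (p2 : List Int) (out : List Int) : Decidable (Spec_cruzamento p1 p2 out) := by unfold Spec_cruzamento; infer_instance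

-- ===== CLAIM (what is proved, stated in full; the proofs are below) =====
def Claim_equal_cruzamento : Prop := ∀ (p1 : List Int) (p2 : List Int), Dom_cruzamento p1 p2 → Pre_cruzamento p1 p2 → Spec_cruzamento p1 p2 (cruzamento p1 p2)

-- ===== LEMMAS AND PROOFS =====
theorem cruzSetFirstNone_of_not_none {f : List (Option Int)} (h : none ∉ f) (x : Int) :
    cruzSetFirstNone f x = f := by
  induction f with
  | nil => rfl
  | cons a r ih =>
    cases a with
    | none => simp at h
    | some b =>
      simp only [List.mem_cons, not_or] at h
      simp [cruzSetFirstNone, ih h.2]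

theorem mem_cruzSetFirstNone_of_mem {f : List (Option Int)} {v : Int} (h : some v ∈ f) (x : Int) :
    some v ∈ cruzSetFirstNone f x := by
  induction f with
  | nil => simp at h
  | cons a r ih =>
    cases a with
    | none =>
      rcases List.mem_cons.mp h with h | h
      · simp at h
      · simp [cruzSetFirstNone, h]
    | some b =>
      rcases List.mem_cons.mp h with h | h
      · simp [cruzSetFirstNone, ← h]
      · simp [cruzSetFirstNone]; exact Or.inr (ih h)

theorem mem_of_mem_cruzSetFirstNone {f : List (Option Int)} {o : Option Int} {x : Int}
    (h : o ∈ cruzSetFirstNone f x) : o ∈ f ∨ o = some x := by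
  induction f with
  | nil => simp [cruzSetFirstNone] at h
  | cons a r ih =>
    cases a with
    | none =>
      rcases List.mem_cons.mp h with h | h
      · exact Or.inr h
      · exact Or.inl (List.mem_cons.mpr (Or.inr h))
    | some b =>
      rcases List.mem_cons.mp h with h | h
      · exact Or.inl (List.mem_cons.mpr (Or.inl h))
      · rcases ih h with h | h
        · exact Or.inl (List.mem_cons.mpr (Or.inr h))
        · exact Or.inr h

theorem mem_cruzSetFirstNone_self {f : List (Option Int)} (h : none ∈ f) (x : Int) :
    some x ∈ cruzSetFirstNone f x := by
  induction f with
  | nil => simp at h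
  | cons a r ih =>
    cases a with
    | none => simp [cruzSetFirstNone]
    | some b =>
      simp only [List.mem_cons, reduceCtorEq, false_or] at h
      simp [cruzSetFirstNone]
      exact Or.inr (ih h)

-- place the fill values into the None slots of f, in order, dropping leftovers
def cruzPlace : List (Option Int) → List Int → List (Option Int)
  | [], _ => []
  | none :: r, v :: vs => some v :: cruzPlace r vs
  | none :: r, [] => none :: r
  | some a :: r, vs => some a :: cruzPlace r vs

-- the values A's second loop inserts, in order (seen = values already present)
def cruzFillF : List Int → PySem.Set (Option Int) → List Int
  | [], _ => []
  | x :: xs, seen =>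
    if some x ∈ seen then cruzFillF xs seen
    else x :: cruzFillF xs (PySem.Set.add seen (some x))

theorem cruzPlace_nil (f : List (Option Int)) : cruzPlace f [] = f := by
  induction f with
  | nil => rfl
  | cons a r ih => cases a <;> simp [cruzPlace, ih]

theorem cruzPlace_cons (f : List (Option Int)) (x : Int) (vs : List Int) :
    cruzPlace f (x :: vs) = cruzPlace (cruzSetFirstNone f x) vs := by
  induction f with
  | nil => rfl
  | cons a r ih => cases a <;> simp [cruzPlace, cruzSetFirstNone, ih]

theorem cruz_loop_eq (xs : List Int) :
    ∀ (f : List (Option Int)) (seen : PySem.Set (Option Int)),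
    (∀ v : Int, some v ∈ f → some v ∈ seen) →
    (∀ v : Int, some v ∈ seen → some v ∉ f → none ∉ f) →
    xs.foldl (fun f x => if some x ∈ f then f else cruzSetFirstNone f x) f
      = cruzPlace f (cruzFillF xs seen) := by
  induction xs with
  | nil =>
    intro f seen _ _
    simp [cruzFillF, cruzPlace_nil]
  | cons x xs ih =>
    intro f seen h1 h2
    by_cases hs : some x ∈ seen
    · by_cases hf : some x ∈ f
      · simpa [cruzFillF, hs, hf] using ih f seen h1 h2
      · have hn : none ∉ f := h2 x hs hf
        simpa [cruzFillF, hs, hf, cruzSetFirstNone_of_not_none hn] using ih f seen h1 h2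
    · have hf : some x ∉ f := fun h => hs (h1 x h)
      simp only [cruzFillF, hs, if_false, List.foldl_cons, hf]
      rw [cruzPlace_cons]
      apply ih
      · intro v hv
        rcases mem_of_mem_cruzSetFirstNone hv with h | h
        · exact (PySem.Set.mem_add seen _ _).mpr (Or.inl (h1 v h))
        · exact (PySem.Set.mem_add seen _ _).mpr (Or.inr h)
      · intro v hv hv'
        by_cases hvx : v = x
        · subst hvx
          by_cases hn : none ∈ f
          · exact absurd (mem_cruzSetFirstNone_self hn v) hv'
          · intro hn'
            rcases mem_of_mem_cruzSetFirstNone hn' with h | h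
            · exact hn h
            · simp at h
        · have hvs : some v ∈ seen := by
            rcases (PySem.Set.mem_add seen _ _).mp hv with h | h
            · exact h
            · simp only [Option.some.injEq] at h; exact absurd h hvx
          have hvf : some v ∉ f := fun h => hv' (mem_cruzSetFirstNone_of_mem h x)
          have hn : none ∉ f := h2 v hvs hvf
          intro hn'
          rcases mem_of_mem_cruzSetFirstNone hn' with h | h
          · exact hn h
          · simp at h

theorem cruzFillF_append (xs ys : List Int) :
    ∀ seen : PySem.Set (Option Int),
    cruzFillF (xs ++ ys) seen
      = cruzFillF xs seen ++ cruzFillF ys (PySem.Set.update seen (xs.map some)) := by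
  induction xs with
  | nil => intro seen; simp [cruzFillF, PySem.Set.update_nil]
  | cons x xs ih =>
    intro seen
    by_cases hs : some x ∈ seen
    · simp only [List.cons_append, cruzFillF, hs, if_true, List.map_cons,
        PySem.Set.update_cons, PySem.Set.add_of_mem hs]
      exact ih seen
    · simp only [List.cons_append, cruzFillF, hs, if_false, List.map_cons,
        PySem.Set.update_cons, List.cons_append]
      rw [ih (PySem.Set.add seen (some x))]

theorem cruzFillF_eq_dedup (xs : List Int) (seen : PySem.Set (Option Int)) :
    cruzFillF xs seen
      = PySem.Set.ofList (xs.filter (fun y => !(decide (some y ∈ seen)))) := by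
  induction xs using List.reverseRecOn with
  | nil => rfl
  | append_singleton xs x ih =>
    rw [cruzFillF_append, ih, List.filter_append]
    by_cases hs : some x ∈ seen
    · have h1 : cruzFillF [x] (PySem.Set.update seen (xs.map some)) = [] := by
        have : some x ∈ PySem.Set.update seen (xs.map some) :=
          (PySem.Set.mem_update _ _ _).mpr (Or.inl hs)
        simp [cruzFillF, this]
      simp [h1, hs]
    · by_cases hx : x ∈ xs
      · have h1 : cruzFillF [x] (PySem.Set.update seen (xs.map some)) = [] := by
          have : some x ∈ PySem.Set.update seen (xs.map some) :=
            (PySem.Set.mem_update _ _ _).mpr (Or.inr (List.mem_map_of_mem hx))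
          simp [cruzFillF, this]
        have h2 : x ∈ PySem.Set.ofList (xs.filter (fun y => !(decide (some y ∈ seen)))) :=
          (PySem.Set.mem_ofList _ _).mpr (List.mem_filter.mpr ⟨hx, by simp [hs]⟩)
        simp only [h1, List.append_nil, List.filter_cons, List.filter_nil, hs,
          decide_false, Bool.not_false, if_true, PySem.Set.ofList_append_singleton,
          PySem.Set.add_of_mem h2]
      · have h1 : cruzFillF [x] (PySem.Set.update seen (xs.map some)) = [x] := by
          have : some x ∉ PySem.Set.update seen (xs.map some) := by
            intro h
            rcases (PySem.Set.mem_update _ _ _).mp h with h | h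
            · exact hs h
            · rcases List.mem_map.mp h with ⟨y, hy, hyx⟩
              exact hx (Option.some.inj hyx ▸ hy)
          simp [cruzFillF, this]
        have h2 : x ∉ PySem.Set.ofList (xs.filter (fun y => !(decide (some y ∈ seen)))) := by
          intro h
          exact hx (List.mem_filter.mp ((PySem.Set.mem_ofList _ _).mp h)).1
        simp only [h1, List.filter_cons, List.filter_nil, hs, decide_false,
          Bool.not_false, if_true, PySem.Set.ofList_append_singleton,
          PySem.Set.add_of_not_mem h2]

theorem cruz_range_loop_eq (p2 : List Int) (n : Nat) (hn : n ≤ p2.length) (f : List (Option Int)) :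
    (PySem.List.pyRange 0 n 1).foldl (fun f i =>
      match PySem.List.pyGet? p2 i with
      | some x => if some x ∈ f then f else cruzSetFirstNone f x
      | none => f) f
    = (p2.take n).foldl (fun f x => if some x ∈ f then f else cruzSetFirstNone f x) f := by
  induction n generalizing f with
  | zero => simp [PySem.List.pyRange_one_eq_nil]
  | succ m ih =>
    have hm : m < p2.length := Nat.lt_of_succ_le hn
    rw [show ((m + 1 : Nat) : Int) = (m : Int) + 1 by push_cast; ring,
      PySem.List.pyRange_one_succ_right (by positivity)]
    rw [List.foldl_append, ih (Nat.le_of_succ_le hn)]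
    rw [List.take_add_one, List.getElem?_eq_getElem hm]
    simp only [Option.toList_some, List.foldl_append, List.foldl_cons, List.foldl_nil,
      PySem.List.pyGet?_natCast, List.getElem?_eq_getElem hm]

theorem cruz_vals_eq (p2 : List Int) (n : Nat) (hn : n ≤ p2.length) :
    (PySem.List.pyRange 0 n 1).map (fun i => (PySem.List.pyGet? p2 i).getD 0) = p2.take n := by
  induction n with
  | zero => simp [PySem.List.pyRange_one_eq_nil]
  | succ m ih =>
    have hm : m < p2.length := Nat.lt_of_succ_le hn
    rw [show ((m + 1 : Nat) : Int) = (m : Int) + 1 by push_cast; ring,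
      PySem.List.pyRange_one_succ_right (by positivity)]
    rw [List.map_append, ih (Nat.le_of_succ_le hn),
      List.take_add_one, List.getElem?_eq_getElem hm]
    simp [PySem.List.pyGet?_natCast, List.getElem?_eq_getElem hm]

theorem cruz_main (p1 p2 : List Int) (hpre : Pre_cruzamento p1 p2) :
    cruzamento p1 p2 = cruzamento_alt p1 p2 := by
  obtain ⟨h1, h2, h7⟩ := hpre
  match p1, h1 with
  | a0 :: a1 :: a2 :: a3 :: r, _ =>
    unfold cruzamento cruzamento_alt
    have hseg : (PySem.List.pyRange 1 4 1).map
        (fun i => (PySem.List.pyGet? (a0 :: a1 :: a2 :: a3 :: r) i).getD 0)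
        = [a1, a2, a3] := by
      rw [show PySem.List.pyRange 1 4 1 = [1, 2, 3] from by decide]
      simp only [List.map_cons, List.map_nil]
      rw [show (1:Int) = ((1:Nat):Int) by norm_num, PySem.List.pyGet?_ofNat _ 1 (by simp)]
      rw [show (2:Int) = ((2:Nat):Int) by norm_num, PySem.List.pyGet?_ofNat _ 2 (by simp)]
      rw [show (3:Int) = ((3:Nat):Int) by norm_num, PySem.List.pyGet?_ofNat _ 3 (by simp)]
      rfl
    have hvals : (PySem.List.pyRange 0 10 1).map
        (fun i => (PySem.List.pyGet? p2 i).getD 0) = p2.take 10 :=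
      cruz_vals_eq p2 10 h2
    have hf1 : (PySem.List.pyRange 1 4 1).foldl (fun f i =>
        match PySem.List.pyGet? (a0 :: a1 :: a2 :: a3 :: r) i with
        | some v => PySem.List.pySetD f i (some v)
        | none => f) (List.replicate 10 none)
        = [none, some a1, some a2, some a3, none, none, none, none, none, none] := by
      rw [show PySem.List.pyRange 1 4 1 = [1, 2, 3] from by decide]
      simp only [List.foldl_cons, List.foldl_nil]
      rw [show (1:Int) = ((1:Nat):Int) by norm_num, PySem.List.pyGet?_ofNat _ 1 (by simp)]
      rw [show (2:Int) = ((2:Nat):Int) by norm_num, PySem.List.pyGet?_ofNat _ 2 (by simp)]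
      rw [show (3:Int) = ((3:Nat):Int) by norm_num, PySem.List.pyGet?_ofNat _ 3 (by simp)]
      rfl
    simp only []
    rw [hf1, hseg, hvals, show (10:Int) = ((10:Nat):Int) by norm_num,
      cruz_range_loop_eq p2 10 h2]
    set F : List (Option Int) :=
      [none, some a1, some a2, some a3, none, none, none, none, none, none] with hFdef
    rw [cruz_loop_eq (p2.take 10) F (PySem.Set.ofList F)
      (fun v hv => (PySem.Set.mem_ofList F _).mpr hv)
      (fun v hv hv' => absurd ((PySem.Set.mem_ofList F _).mp hv) hv'),
      cruzFillF_eq_dedup]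
    have hfilt : (p2.take 10).filter (fun y => !(decide (some y ∈ PySem.Set.ofList F)))
        = (p2.take 10).filter (fun v => decide (v ∉ [a1, a2, a3])) := by
      apply List.filter_congr
      intro x _
      simp [hFdef, PySem.Set.mem_ofList, eq_comm]
    rw [hfilt, PySem.List.dedup_eq_ofList]
    have h7' : 7 ≤ (PySem.Set.ofList
        ((p2.take 10).filter (fun v => decide (v ∉ [a1, a2, a3])))).length := by
      rw [PySem.List.dedup_eq_ofList] at h7
      have he : ((a0 :: a1 :: a2 :: a3 :: r).drop 1).take 3 = [a1, a2, a3] := rfl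
      rw [he] at h7
      exact h7
    set R : List Int :=
      PySem.Set.ofList ((p2.take 10).filter (fun v => decide (v ∉ [a1, a2, a3]))) with hRdef
    clear_value R
    rcases R with _ | ⟨d0, _ | ⟨d1, _ | ⟨d2, _ | ⟨d3, _ | ⟨d4, _ | ⟨d5, _ | ⟨d6, tl⟩⟩⟩⟩⟩⟩⟩ <;>
      simp only [List.length_nil, List.length_cons] at h7' <;> try omega
    rw [show (1 : Int) = ((1 : Nat) : Int) by norm_num,
      show (7 : Int) = ((7 : Nat) : Int) by norm_num,
      PySem.List.slice_to_natCast, PySem.List.slice_natCast]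
    simp [cruzPlace, hFdef]

-- ===== VERDICT (by name: the statement is the Claim_ definition above) =====
theorem cruzamento_spec : Claim_equal_cruzamento := by
  intro p1 p2 _ hpre
  unfold Spec_cruzamento
  exact cruz_main p1 p2 hpre
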